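-- pv_equiv track=rewrite | github.com/Lns-XueFeng/PyAlgorithm | Chapter03/OJ题2.py | func
-- ===== SOURCE A (Python) =====
-- from collections import deque
--
-- def func(mylist):
--     output = []
--     dq = deque()
--
--     i = 0
--     while i < len(mylist):
--         dq.append(mylist[i])
--         while len(dq) > 0 and mylist[i] - dq[0] > 10000:
--             dq.popleft()
--         j = i + 1
--         while j < len(mylist) and mylist[j] == mylist[i]:
--             dq.append(mylist[j])
--             j += 1
--         while i < j:
--             output.append(len(dq))
--             i += 1
--     return output
-- ===== SOURCE B (Python) =====
-- def func(mylist):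
--     # Two staged passes instead of A's deque window: (1) group the list into runs of
--     # equal values; (2) build a max segment tree and answer each run's left boundary
--     # (first index >= L with value >= v - 10000) by a single tree descent.
--     n = len(mylist)
--     if n == 0:
--         return []
--
--     def build(lo, hi):
--         # node = (lo, hi, mx, left, right); leaf = (idx, val)
--         if hi - lo == 1:
--             return (lo, mylist[lo])
--         mid = (lo + hi) // 2
--         left = build(lo, mid)
--         right = build(mid, hi)
--         lmx = left[1] if len(left) == 2 else left[2]
--         rmx = right[1] if len(right) == 2 else right[2]
--         return (lo, hi, max(lmx, rmx), left, right)
--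
--     root = build(0, n)
--
--     def first_ge(nd, t, s):
--         # leftmost index k >= s in nd's range with mylist[k] >= t, else None
--         if len(nd) == 2:
--             idx, val = nd
--             return idx if s <= idx and t <= val else None
--         lo, hi, mx, left, right = nd
--         if hi <= s or mx < t:
--             return None
--         res = first_ge(left, t, s)
--         return res if res is not None else first_ge(right, t, s)
--
--     runs = []
--     i = 0
--     while i < n:
--         j = i + 1
--         while j < n and mylist[j] == mylist[i]:
--             j += 1
--         runs.append((mylist[i], i, j))
--         i = j
--
--     output = []
--     L = 0
--     for v, i, j in runs:
--         r = first_ge(root, v - 10000, L)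
--         if r is not None:
--             L = r
--         output.extend([j - L] * (j - i))
--     return output
-- ===== Notes on version B (the rewrite author's own statement) =====
-- stated objective: alternative
-- what changed: B replaces A's running deque window by two staged passes: it first groups the list into runs of equal values, then builds a max segment tree and finds each run's left boundary (the first index >= L with value >= v-10000) by a single tree descent, so A's per-element deque appends and pop scan disappear entirely.
import Mathlib
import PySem

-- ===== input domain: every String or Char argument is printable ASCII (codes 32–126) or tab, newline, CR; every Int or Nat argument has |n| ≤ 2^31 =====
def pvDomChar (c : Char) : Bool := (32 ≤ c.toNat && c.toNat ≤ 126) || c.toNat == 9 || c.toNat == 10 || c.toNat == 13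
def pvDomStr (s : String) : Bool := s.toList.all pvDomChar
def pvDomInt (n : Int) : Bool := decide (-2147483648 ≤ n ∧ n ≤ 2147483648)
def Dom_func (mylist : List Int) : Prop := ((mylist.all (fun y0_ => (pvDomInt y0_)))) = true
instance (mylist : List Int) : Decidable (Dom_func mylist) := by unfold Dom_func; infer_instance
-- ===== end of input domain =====

-- B replaces A's running deque window by a grouping pass plus a max segment tree that answers each
-- run's left boundary by one tree descent; both are total and agree on every input.
-- Loops/recursions are ported as structural recursion on a fuel counter that always exceeds the
-- remaining iteration count (or recursion depth), so the guarded bodies are exact transliterations.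

-- ===== PORT A =====
-- inner 'while len(dq) > 0 and mylist[i] - dq[0] > 10000: dq.popleft()'
def popA (x : Int) : List Int → List Int
  | [] => []
  | h :: t => if x - h > 10000 then popA x t else h :: t

-- inner 'while j < len(mylist) and mylist[j] == mylist[i]: dq.append(mylist[j]); j += 1'
def eqAF (mylist : List Int) (v : Int) : Nat → List Int → Nat → List Int × Nat
  | 0, dq, j => (dq, j)
  | fuel + 1, dq, j =>
    if j < mylist.length then
      if mylist.getD j 0 = v then eqAF mylist v fuel (dq ++ [mylist.getD j 0]) (j + 1)
      else (dq, j)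
    else (dq, j)

-- inner 'while i < j: output.append(len(dq)); i += 1'
def emitAF (c : Int) : Nat → List Int → Nat → Nat → List Int
  | 0, output, _, _ => output
  | fuel + 1, output, i, j =>
    if i < j then emitAF c fuel (output ++ [c]) (i + 1) j else output

-- outer 'while i < len(mylist)'
def funcLoopF (mylist : List Int) : Nat → List Int → List Int → Nat → List Int
  | 0, output, _, _ => output
  | fuel + 1, output, dq, i =>
    if i < mylist.length then
      let x := mylist.getD i 0
      let dq1 := popA x (dq ++ [x])
      let p := eqAF mylist x mylist.length dq1 (i + 1)
      funcLoopF mylist fuel (emitAF (Int.ofNat p.1.length) mylist.length output i p.2) p.1 p.2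
    else output

def func (mylist : List Int) : List Int := funcLoopF mylist mylist.length [] [] 0

-- ===== PORT B =====
-- segment-tree node: leaf (idx, val) | node (lo, hi, mx, left, right)
inductive PvSegT where
  | leaf : Nat → Int → PvSegT
  | node : Nat → Nat → Int → PvSegT → PvSegT → PvSegT

-- 'lmx = ...' / 'rmx = ...': the max stored at (or value of) a subtree
def pvMx : PvSegT → Int
  | .leaf _ v => v
  | .node _ _ m _ _ => m

-- 'def build(lo, hi): ...' (fuel bounds the recursion depth; hi - lo ≤ fuel on every call)
def buildT (a : List Int) : Nat → Nat → Nat → PvSegT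
  | 0, lo, _ => .leaf lo (a.getD lo 0)
  | fuel + 1, lo, hi =>
    if hi - lo = 1 then .leaf lo (a.getD lo 0)
    else
      let mid := (lo + hi) / 2
      let l := buildT a fuel lo mid
      let r := buildT a fuel mid hi
      .node lo hi (max (pvMx l) (pvMx r)) l r

-- 'def first_ge(nd, t, s): ...'
def firstGE (t : Int) (s : Nat) : PvSegT → Option Nat
  | .leaf i v => if s ≤ i ∧ t ≤ v then some i else none
  | .node _ hi m l r =>
    if hi ≤ s ∨ m < t then none
    else
      match firstGE t s l with
      | some k => some k
      | none => firstGE t s r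

-- 'j = i + 1; while j < n and mylist[j] == mylist[i]: j += 1'
def runEndB (mylist : List Int) (v : Int) : Nat → Nat → Nat
  | 0, j => j
  | fuel + 1, j =>
    if j < mylist.length then
      if mylist.getD j 0 = v then runEndB mylist v fuel (j + 1) else j
    else j

-- the grouping pass: 'runs.append((mylist[i], i, j)); i = j'
def runsF (mylist : List Int) : Nat → Nat → List (Int × Nat × Nat)
  | 0, _ => []
  | fuel + 1, i =>
    if i < mylist.length then
      let v := mylist.getD i 0
      let j := runEndB mylist v mylist.length (i + 1)
      (v, i, j) :: runsF mylist fuel j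
    else []

-- 'for v, i, j in runs: r = first_ge(root, v - 10000, L); if r is not None: L = r; output.extend(...)'
def bLoopF (root : PvSegT) : List (Int × Nat × Nat) → List Int → Nat → List Int
  | [], output, _ => output
  | (v, i, j) :: rest, output, L =>
    let L' := match firstGE (v - 10000) L root with
      | some k => k
      | none => L
    bLoopF root rest (output ++ List.replicate (j - i) (Int.ofNat j - Int.ofNat L')) L'

def func_alt (mylist : List Int) : List Int :=
  if mylist.length = 0 then []
  else
    bLoopF (buildT mylist mylist.length 0 mylist.length)
      (runsF mylist mylist.length 0) [] 0

-- ===== PRECONDITION & SPEC =====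
def Spec_func (mylist : List Int) (out : List Int) : Prop := out = func_alt mylist
instance (mylist : List Int) (out : List Int) : Decidable (Spec_func mylist out) := by unfold Spec_func; infer_instance

-- ===== CLAIM (what is proved, stated in full; the proofs are below) =====
def Claim_equal_func : Prop := ∀ (mylist : List Int), Dom_func mylist → Spec_func mylist (func mylist)

-- ===== LEMMAS AND PROOFS =====

-- ---- proof-internal two-pointer intermediate: A's deque is always the window mylist[l:k] ----
def advanceLF (mylist : List Int) (v : Int) : Nat → Nat → Nat
  | 0, l => l
  | fuel + 1, l =>
    if l < mylist.length then
      if v - mylist.getD l 0 > 10000 then advanceLF mylist v fuel (l + 1) else l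
    else l

def altLoopF (mylist : List Int) : Nat → List Int → Nat → Nat → List Int
  | 0, output, _, _ => output
  | fuel + 1, output, l, i =>
    if i < mylist.length then
      let v := mylist.getD i 0
      let j := runEndB mylist v mylist.length (i + 1)
      let l' := advanceLF mylist v mylist.length l
      altLoopF mylist fuel (output ++ List.replicate (j - i) (Int.ofNat (j - l'))) l' j
    else output

def pvWin (mylist : List Int) (l k : Nat) : List Int := (mylist.drop l).take (k - l)

theorem pvWin_len (mylist : List Int) (l k : Nat) (hk : k ≤ mylist.length) :
    (pvWin mylist l k).length = k - l := by
  simp [pvWin]; omega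

theorem pvWin_snoc (mylist : List Int) (l j : Nat) (hl : l ≤ j) (hj : j < mylist.length) :
    pvWin mylist l j ++ [mylist.getD j 0] = pvWin mylist l (j + 1) := by
  have h1 : j + 1 - l = (j - l) + 1 := by omega
  rw [pvWin, pvWin, h1, List.take_add_one]
  have h2 : (mylist.drop l)[j - l]? = some mylist[j] := by
    rw [List.getElem?_drop]
    have h3 : l + (j - l) = j := by omega
    rw [h3]
    exact List.getElem?_eq_getElem hj
  simp [h2, List.getD_eq_getElem?_getD, List.getElem?_eq_getElem hj]

theorem pvWin_cons (mylist : List Int) (l k : Nat) (hl : l < k) (hk : k ≤ mylist.length) :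
    pvWin mylist l k = mylist.getD l 0 :: pvWin mylist (l + 1) k := by
  have hl2 : l < mylist.length := by omega
  rw [pvWin, pvWin, List.drop_eq_getElem_cons hl2]
  have h1 : k - l = (k - (l + 1)) + 1 := by omega
  rw [h1, List.take_succ_cons]
  simp [List.getD_eq_getElem?_getD, List.getElem?_eq_getElem hl2]

theorem runEndB_ge (mylist : List Int) (v : Int) :
    ∀ (fuel j : Nat), j ≤ runEndB mylist v fuel j := by
  intro fuel
  induction fuel with
  | zero => intro j; simp [runEndB]
  | succ n ih =>
    intro j
    rw [runEndB]
    by_cases hj : j < mylist.length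
    · rw [if_pos hj]
      by_cases hv : mylist.getD j 0 = v
      · rw [if_pos hv]
        have := ih (j + 1)
        omega
      · rw [if_neg hv]
    · rw [if_neg hj]

theorem runEndB_le (mylist : List Int) (v : Int) :
    ∀ (fuel j : Nat), j ≤ mylist.length → runEndB mylist v fuel j ≤ mylist.length := by
  intro fuel
  induction fuel with
  | zero => intro j hj; simpa [runEndB] using hj
  | succ n ih =>
    intro j hj
    rw [runEndB]
    by_cases hj2 : j < mylist.length
    · rw [if_pos hj2]
      by_cases hv : mylist.getD j 0 = v
      · rw [if_pos hv]
        exact ih (j + 1) (by omega)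
      · rw [if_neg hv]; omega
    · rw [if_neg hj2]; omega

theorem eqA_win (mylist : List Int) (v : Int) :
    ∀ (fuel l j : Nat), l ≤ j → j ≤ mylist.length →
      eqAF mylist v fuel (pvWin mylist l j) j
        = (pvWin mylist l (runEndB mylist v fuel j), runEndB mylist v fuel j) := by
  intro fuel
  induction fuel with
  | zero => intro l j _ _; simp [eqAF, runEndB]
  | succ n ih =>
    intro l j hl hj
    rw [eqAF, runEndB]
    by_cases hj2 : j < mylist.length
    · rw [if_pos hj2, if_pos hj2]
      by_cases hv : mylist.getD j 0 = v
      · rw [if_pos hv, if_pos hv]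
        rw [pvWin_snoc mylist l j hl hj2]
        exact ih l (j + 1) (by omega) (by omega)
      · rw [if_neg hv, if_neg hv]
    · rw [if_neg hj2, if_neg hj2]

theorem pop_win (mylist : List Int) (i : Nat) (hi : i < mylist.length) :
    ∀ (fuel l : Nat), i - l ≤ fuel → l ≤ i →
      popA (mylist.getD i 0) (pvWin mylist l (i + 1))
        = pvWin mylist (advanceLF mylist (mylist.getD i 0) fuel l) (i + 1)
      ∧ advanceLF mylist (mylist.getD i 0) fuel l ≤ i := by
  intro fuel
  induction fuel with
  | zero =>
    intro l hf hl2
    have hli : l = i := by omega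
    subst hli
    have hcond : ¬ (mylist.getD l 0 - mylist.getD l 0 > 10000) := by omega
    rw [advanceLF]
    rw [pvWin_cons mylist l (l + 1) (by omega) (by omega)]
    simp only [popA, if_neg hcond]
    exact ⟨trivial, le_refl l⟩
  | succ n ih =>
    intro l hf hl2
    have hl3 : l < mylist.length := by omega
    rw [advanceLF, if_pos hl3]
    rw [pvWin_cons mylist l (i + 1) (by omega) (by omega)]
    by_cases hcond : mylist.getD i 0 - mylist.getD l 0 > 10000
    · rw [if_pos hcond]
      simp only [popA, if_pos hcond]
      have hne : l ≠ i := by intro he; subst he; omega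
      exact ih (l + 1) (by omega) (by omega)
    · rw [if_neg hcond]
      simp only [popA, if_neg hcond]
      rw [pvWin_cons mylist l (i + 1) (by omega) (by omega)]
      exact ⟨rfl, hl2⟩

theorem emitA_eq (c : Int) :
    ∀ (fuel : Nat) (output : List Int) (i j : Nat), j - i ≤ fuel →
      emitAF c fuel output i j = output ++ List.replicate (j - i) c := by
  intro fuel
  induction fuel with
  | zero =>
    intro output i j hf
    have h1 : j - i = 0 := by omega
    simp [emitAF, h1]
  | succ n ih =>
    intro output i j hf
    rw [emitAF]
    by_cases hij : i < j
    · rw [if_pos hij, ih (output ++ [c]) (i + 1) j (by omega)]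
      have h1 : j - i = (j - (i + 1)) + 1 := by omega
      rw [h1, List.replicate_succ]
      simp
    · rw [if_neg hij]
      have h1 : j - i = 0 := by omega
      simp [h1]

theorem loop_eq (mylist : List Int) :
    ∀ (fuel : Nat) (output : List Int) (l i : Nat),
      mylist.length - i ≤ fuel → l ≤ i →
      funcLoopF mylist fuel output (pvWin mylist l i) i = altLoopF mylist fuel output l i := by
  intro fuel
  induction fuel with
  | zero => intro output l i hf hl; rw [funcLoopF, altLoopF]
  | succ n ih =>
    intro output l i hf hl
    rw [funcLoopF, altLoopF]
    by_cases hi : i < mylist.length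
    · rw [if_pos hi, if_pos hi]
      simp only
      rw [pvWin_snoc mylist l i hl hi]
      obtain ⟨hpop, hl'⟩ := pop_win mylist i hi mylist.length l (by omega) hl
      rw [hpop]
      set v := mylist.getD i 0 with hv
      set l' := advanceLF mylist v mylist.length l with hl'def
      have hJle : runEndB mylist v mylist.length (i + 1) ≤ mylist.length :=
        runEndB_le mylist v mylist.length (i + 1) (by omega)
      have hJge : i + 1 ≤ runEndB mylist v mylist.length (i + 1) :=
        runEndB_ge mylist v mylist.length (i + 1)
      rw [eqA_win mylist v mylist.length l' (i + 1) (by omega) (by omega)]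
      simp only
      rw [pvWin_len mylist l' (runEndB mylist v mylist.length (i + 1)) hJle]
      rw [emitA_eq (Int.ofNat (runEndB mylist v mylist.length (i + 1) - l')) mylist.length output i
            (runEndB mylist v mylist.length (i + 1)) (by omega)]
      exact ih _ l' (runEndB mylist v mylist.length (i + 1)) (by omega) (by omega)
    · rw [if_neg hi, if_neg hi]

-- characterisation of the left-boundary advance (the result of A's pop loop)
theorem advance_char (a : List Int) (i : Nat) (hi : i < a.length) :
    ∀ (fuel l : Nat), l ≤ i → i - l ≤ fuel →
      l ≤ advanceLF a (a.getD i 0) fuel l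
      ∧ (∀ k, l ≤ k → k < advanceLF a (a.getD i 0) fuel l → a.getD i 0 - a.getD k 0 > 10000)
      ∧ ¬ (a.getD i 0 - a.getD (advanceLF a (a.getD i 0) fuel l) 0 > 10000) := by
  intro fuel
  induction fuel with
  | zero =>
    intro l hl hf
    have : l = i := by omega
    subst this
    rw [advanceLF]
    exact ⟨le_refl _, fun k h1 h2 => by omega, by omega⟩
  | succ n ih =>
    intro l hl hf
    have hln : l < a.length := by omega
    rw [advanceLF, if_pos hln]
    by_cases hc : a.getD i 0 - a.getD l 0 > 10000
    · rw [if_pos hc]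
      have hne : l ≠ i := by
        intro he; subst he; omega
      obtain ⟨h1, h2, h3⟩ := ih (l + 1) (by omega) (by omega)
      refine ⟨by omega, ?_, h3⟩
      intro k hk1 hk2
      rcases Nat.lt_or_ge k (l + 1) with h | h
      · have : k = l := by omega
        subst this; exact hc
      · exact h2 k h hk2
    · rw [if_neg hc]
      exact ⟨le_refl _, fun k h1 h2 => by omega, hc⟩

-- ---- the segment tree represents the interval [lo, hi) of the list ----
def RepT (a : List Int) : PvSegT → Nat → Nat → Prop
  | .leaf i v, lo, hi => lo = i ∧ hi = i + 1 ∧ hi ≤ a.length ∧ v = a.getD i 0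
  | .node lo' hi' m l r, lo, hi =>
      lo' = lo ∧ hi' = hi ∧ hi ≤ a.length ∧
      (∀ k, lo ≤ k → k < hi → a.getD k 0 ≤ m) ∧
      ∃ mid, lo < mid ∧ mid < hi ∧ RepT a l lo mid ∧ RepT a r mid hi

theorem rep_mx_bound (a : List Int) (T : PvSegT) (lo hi : Nat) (h : RepT a T lo hi) :
    ∀ k, lo ≤ k → k < hi → a.getD k 0 ≤ pvMx T := by
  cases T with
  | leaf i v =>
    obtain ⟨h1, h2, h3, h4⟩ := h
    intro k hk1 hk2
    have : k = i := by omega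
    subst this
    simp [pvMx, h4]
  | node lo' hi' m l r =>
    obtain ⟨h1, h2, h3, hb, _⟩ := h
    intro k hk1 hk2
    exact hb k hk1 hk2

theorem build_rep (a : List Int) :
    ∀ (fuel lo hi : Nat), lo < hi → hi ≤ a.length → hi - lo ≤ fuel →
      RepT a (buildT a fuel lo hi) lo hi := by
  intro fuel
  induction fuel with
  | zero => intro lo hi h1 h2 h3; omega
  | succ n ih =>
    intro lo hi h1 h2 h3
    rw [buildT]
    by_cases hbase : hi - lo = 1
    · rw [if_pos hbase]
      exact ⟨rfl, by omega, h2, rfl⟩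
    · rw [if_neg hbase]
      simp only
      have hmid1 : lo < (lo + hi) / 2 := by omega
      have hmid2 : (lo + hi) / 2 < hi := by omega
      have repL := ih lo ((lo + hi) / 2) hmid1 (by omega) (by omega)
      have repR := ih ((lo + hi) / 2) hi hmid2 h2 (by omega)
      refine ⟨rfl, rfl, h2, ?_, (lo + hi) / 2, hmid1, hmid2, repL, repR⟩
      intro k hk1 hk2
      rcases Nat.lt_or_ge k ((lo + hi) / 2) with h | h
      · exact le_trans (rep_mx_bound a _ lo ((lo + hi) / 2) repL k hk1 h) (le_max_left _ _)
      · exact le_trans (rep_mx_bound a _ ((lo + hi) / 2) hi repR k h hk2) (le_max_right _ _)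

-- the tree descent returns the leftmost index ≥ s in [lo, hi) whose value is ≥ t
theorem firstGE_char (a : List Int) :
    ∀ (T : PvSegT) (lo hi : Nat), RepT a T lo hi → ∀ (t : Int) (s : Nat),
      (∀ k, firstGE t s T = some k →
        lo ≤ k ∧ k < hi ∧ s ≤ k ∧ t ≤ a.getD k 0
          ∧ ∀ m, lo ≤ m → m < k → s ≤ m → a.getD m 0 < t)
      ∧ (firstGE t s T = none → ∀ k, lo ≤ k → k < hi → s ≤ k → a.getD k 0 < t) := by
  intro T
  induction T with
  | leaf i v =>
    intro lo hi hrep t s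
    obtain ⟨h1, h2, h3, h4⟩ := hrep
    constructor
    · intro k hk
      rw [firstGE] at hk
      by_cases hc : s ≤ i ∧ t ≤ v
      · rw [if_pos hc] at hk
        have hki : i = k := by injection hk
        refine ⟨by omega, by omega, by omega, ?_, fun m hm1 hm2 _ => by omega⟩
        rw [← hki, ← h4]
        exact hc.2
      · rw [if_neg hc] at hk
        exact absurd hk (by simp)
    · intro hk k hk1 hk2 hk3
      rw [firstGE] at hk
      by_cases hc : s ≤ i ∧ t ≤ v
      · rw [if_pos hc] at hk
        exact absurd hk (by simp)
      · have hki : k = i := by omega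
        rw [hki, ← h4]
        by_contra hcon
        exact hc ⟨by omega, by omega⟩
  | node lo' hi' m l r ihl ihr =>
    intro lo hi hrep t s
    obtain ⟨h1, h2, h3, hb, mid, hm1, hm2, repL, repR⟩ := hrep
    obtain ⟨ihlS, ihlN⟩ := ihl lo mid repL t s
    obtain ⟨ihrS, ihrN⟩ := ihr mid hi repR t s
    constructor
    · intro k hk
      rw [firstGE] at hk
      by_cases hc : hi' ≤ s ∨ m < t
      · rw [if_pos hc] at hk
        exact absurd hk (by simp)
      · rw [if_neg hc] at hk
        cases hL : firstGE t s l with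
        | some k' =>
          rw [hL] at hk
          have hkk : k' = k := by injection hk
          rw [← hkk]
          obtain ⟨c1, c2, c3, c4, c5⟩ := ihlS k' hL
          exact ⟨c1, by omega, c3, c4, fun m' hm'1 hm'2 hm'3 => c5 m' hm'1 hm'2 hm'3⟩
        | none =>
          rw [hL] at hk
          obtain ⟨c1, c2, c3, c4, c5⟩ := ihrS k hk
          refine ⟨by omega, c2, c3, c4, ?_⟩
          intro m' hm'1 hm'2 hm'3
          rcases Nat.lt_or_ge m' mid with h | h
          · exact ihlN hL m' hm'1 h hm'3
          · exact c5 m' h hm'2 hm'3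
    · intro hk k hk1 hk2 hk3
      rw [firstGE] at hk
      by_cases hc : hi' ≤ s ∨ m < t
      · rcases hc with h | h
        · omega
        · exact lt_of_le_of_lt (hb k hk1 hk2) h
      · rw [if_neg hc] at hk
        cases hL : firstGE t s l with
        | some k' => rw [hL] at hk; exact absurd hk (by simp)
        | none =>
          rw [hL] at hk
          rcases Nat.lt_or_ge k mid with h | h
          · exact ihlN hL k hk1 h hk3
          · exact ihrN hk k h hk2 hk3

-- main loop lemma: B's fold over the runs equals the two-pointer loop
theorem bLoop_eq (a : List Int) (root : PvSegT) (hrep : RepT a root 0 a.length) :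
    ∀ (fuel : Nat) (output : List Int) (L i : Nat),
      a.length - i ≤ fuel → L ≤ i →
      bLoopF root (runsF a fuel i) output L = altLoopF a fuel output L i := by
  intro fuel
  induction fuel with
  | zero => intro output L i hf hl; rw [runsF, bLoopF, altLoopF]
  | succ n ih =>
    intro output L i hf hl
    rw [runsF, altLoopF]
    by_cases hi : i < a.length
    · rw [if_pos hi, if_pos hi]
      simp only
      rw [bLoopF]
      set v := a.getD i 0 with hv
      set j := runEndB a v a.length (i + 1) with hj
      set l' := advanceLF a v a.length L with hl'
      have hJge : i + 1 ≤ j := by rw [hj]; exact runEndB_ge a v a.length (i + 1)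
      obtain ⟨hLge, hLrun, hLend⟩ := advance_char a i hi a.length L hl (by omega)
      rw [← hv, ← hl'] at hLge hLrun hLend
      have hLle : l' ≤ i := by
        have := (pop_win a i hi a.length L (by omega) hl).2
        rw [← hv, ← hl'] at this
        exact this
      obtain ⟨hsome, hnone⟩ := firstGE_char a root 0 a.length hrep (v - 10000) L
      have hkey : (match firstGE (v - 10000) L root with
          | some k => k
          | none => L) = l' := by
        cases hq : firstGE (v - 10000) L root with
        | none =>
          exfalso
          have := hnone hq i (by omega) hi hl
          omega
        | some k =>
          simp only
          obtain ⟨c1, c2, c3, c4, c5⟩ := hsome k hq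
          rcases lt_trichotomy k l' with h | h | h
          · have := hLrun k c3 h
            omega
          · exact h
          · have := c5 l' (by omega) h (by omega)
            omega
      rw [hkey]
      have hval : Int.ofNat j - Int.ofNat l' = Int.ofNat (j - l') := by
        simp only [Int.ofNat_eq_natCast]
        omega
      rw [hval]
      exact ih (output ++ List.replicate (j - i) (Int.ofNat (j - l'))) l' j (by omega) (by omega)
    · rw [if_neg hi, if_neg hi, bLoopF]

-- ===== VERDICT (by name: the statement is the Claim_ definition above) =====
theorem func_spec : Claim_equal_func := by
  intro mylist _
  unfold Spec_func func func_alt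
  by_cases hn : mylist.length = 0
  · rw [if_pos hn, hn]
    rw [funcLoopF]
  · rw [if_neg hn]
    have hrep : RepT mylist (buildT mylist mylist.length 0 mylist.length) 0 mylist.length :=
      build_rep mylist mylist.length 0 mylist.length (by omega) (le_refl _) (by omega)
    rw [bLoop_eq mylist _ hrep mylist.length [] 0 0 (by omega) (by omega)]
    have := loop_eq mylist mylist.length [] 0 0 (by omega) (by omega)
    simpa [pvWin] using this
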